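-- pv_equiv track=rewrite | github.com/yarov3so/Schedule-Helper | app.py | first_period
-- ===== SOURCE A (Python) =====
-- def first_period(sched): # Periods must be non-overlapping!
--
--     min_index_hr=min([period["start"][0] for period in sched])
--     sched_min_hr=[]
--     for period in sched:
--         if period["start"][0]==min_index_hr:
--             sched_min_hr.append(period)
--     min_index_min=min([period["start"][1] for period in sched_min_hr])
--     for period in sched_min_hr:
--         if period["start"][1]==min_index_min:
--             return period
-- ===== SOURCE B (Python) =====
-- def first_period(sched):  # one linear pass: min over the lexicographic (hour, minute) start key
--     return min(sched, key=lambda period: (period["start"][0], period["start"][1]))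
-- ===== Notes on version B (the rewrite author's own statement) =====
-- stated objective: simpler
-- what changed: A's four stages (min of hours, filter to min-hour periods, min of minutes, rescan for the first match) are replaced by a single min over the lexicographic (start hour, start minute) key, which keeps first-occurrence tie-breaking.
-- outside the precondition, e.g. on first_period([{'start': [1, 2]}, {'start': [3]}]): A returns {'start': [1, 2]}, B raises IndexError
import Mathlib
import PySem

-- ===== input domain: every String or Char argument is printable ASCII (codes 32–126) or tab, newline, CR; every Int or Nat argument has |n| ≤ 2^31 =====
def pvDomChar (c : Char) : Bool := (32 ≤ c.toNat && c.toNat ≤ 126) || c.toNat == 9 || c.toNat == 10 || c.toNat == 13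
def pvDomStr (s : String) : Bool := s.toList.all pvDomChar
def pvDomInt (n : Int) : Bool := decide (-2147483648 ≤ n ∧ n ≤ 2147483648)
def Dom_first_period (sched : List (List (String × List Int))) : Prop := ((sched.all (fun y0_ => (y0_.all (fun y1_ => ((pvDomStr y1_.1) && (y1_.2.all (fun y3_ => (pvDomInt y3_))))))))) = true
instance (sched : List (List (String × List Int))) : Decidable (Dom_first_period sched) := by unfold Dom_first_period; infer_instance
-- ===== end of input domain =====

-- B replaces A's staged min-hour/filter/min-minute scans by one linear min over the lexicographic (hour, minute) start key (simpler decomposition, same O(n) cost).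


-- shared subscript helpers: period["start"][0] and period["start"][1] (first-match dict lookup; defaults only reached outside Pre_)
def pvStart (p : List (String × List Int)) : List Int := (p.lookup "start").getD []
def pvHr (p : List (String × List Int)) : Int := PySem.List.pyGetD (pvStart p) 0 0
def pvMn (p : List (String × List Int)) : Int := PySem.List.pyGetD (pvStart p) 1 0

-- ===== PORT A =====
def first_period (sched : List (List (String × List Int))) : List (String × List Int) :=
  let min_index_hr : Int := (PySem.List.min? (sched.map (fun period => pvHr period)) (fun v => v)).getD 0
  let sched_min_hr : List (List (String × List Int)) :=
    sched.foldl (fun acc period => if pvHr period = min_index_hr then acc ++ [period] else acc) []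
  let min_index_min : Int := (PySem.List.min? (sched_min_hr.map (fun period => pvMn period)) (fun v => v)).getD 0
  (sched_min_hr.find? (fun period => pvMn period == min_index_min)).getD []

-- ===== PORT B =====
def first_period_alt (sched : List (List (String × List Int))) : List (String × List Int) :=
  (PySem.List.min2? sched (fun period => pvHr period) (fun period => pvMn period)).getD []

-- ===== PRECONDITION & SPEC =====
-- Pre_ excludes the empty schedule (both raise ValueError) and schedules where some period lacks a
-- "start" list of ≥ 2 entries: there A raises KeyError/IndexError — or, when such a period is not at
-- the minimal hour, A still returns while B's key evaluation raises IndexError (see claim cites).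
def Pre_first_period (sched : List (List (String × List Int))) : Prop :=
  sched ≠ [] ∧ ∀ p ∈ sched, 2 ≤ (pvStart p).length
instance (sched : List (List (String × List Int))) : Decidable (Pre_first_period sched) := by unfold Pre_first_period; infer_instance
def pvWitness_first_period : (List (List (String × List Int))) := [[("start", [9, 30])], [("start", [8, 45])]]
def Spec_first_period (sched : List (List (String × List Int))) (out : List (String × List Int)) : Prop := out = first_period_alt sched
instance (sched : List (List (String × List Int))) (out : List (String × List Int)) : Decidable (Spec_first_period sched out) := by unfold Spec_first_period; infer_instance

-- ===== CLAIM (what is proved, stated in full; the proofs are below) =====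
def Claim_equal_first_period : Prop := ∀ (sched : List (List (String × List Int))), Dom_first_period sched → Pre_first_period sched → Spec_first_period sched (first_period sched)

-- ===== LEMMAS AND PROOFS =====

-- the lexicographic (hour, minute) key both programs minimise
def pvKey (p : List (String × List Int)) : Lex (Int × Int) := toLex (pvHr p, pvMn p)

-- B's running "first strict-lex minimum" accumulator, extracted from min2?'s fold
def pvBst (m : List (String × List Int)) (xs : List (List (String × List Int))) : List (String × List Int) :=
  xs.foldl (fun m x => if pvKey x < pvKey m then x else m) m

theorem pvBst_nil (m : List (String × List Int)) : pvBst m [] = m := rfl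

theorem pvBst_cons (m x : List (String × List Int)) (xs : List (List (String × List Int))) :
    pvBst m (x :: xs) = pvBst (if pvKey x < pvKey m then x else m) xs := rfl

-- min2?'s replacement test is exactly the strict lexicographic comparison of the keys
theorem pvCond_eq (y m : List (String × List Int)) :
    (decide (pvHr y < pvHr m) || !decide (pvHr m < pvHr y) && decide (pvMn y < pvMn m))
      = decide (pvKey y < pvKey m) := by
  by_cases h1 : pvHr y < pvHr m <;> by_cases h2 : pvHr m < pvHr y <;>
    by_cases h3 : pvMn y < pvMn m <;>
      simp [pvKey, Prod.Lex.toLex_lt_toLex, h1, h2, h3] <;> omega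

theorem foldl_bst (f : Option (List (String × List Int)) → List (String × List Int) → Option (List (String × List Int)))
    (hf : ∀ b y, f (some b) y = some (if pvKey y < pvKey b then y else b)) :
    ∀ (ys : List (List (String × List Int))) (m : List (String × List Int)),
      List.foldl f (some m) ys = some (pvBst m ys) := by
  intro ys
  induction ys with
  | nil => intro m; rfl
  | cons y ys ih =>
    intro m
    rw [List.foldl_cons, hf, pvBst_cons]
    exact ih _

theorem min2?_eq_bst (x : List (String × List Int)) (xs : List (List (String × List Int))) :
    PySem.List.min2? (x :: xs) (fun p => pvHr p) (fun p => pvMn p) = some (pvBst x xs) := by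
  simp only [PySem.List.min2?, List.foldl_cons]
  exact foldl_bst _ (fun b y => by
    show (if (decide (pvHr y < pvHr b) || !decide (pvHr b < pvHr y) && decide (pvMn y < pvMn b)) = true
          then some y else some b) = _
    rw [pvCond_eq]
    by_cases h : pvKey y < pvKey b <;> simp [h]) xs x

theorem pvBst_min (xs : List (List (String × List Int))) (m : List (String × List Int)) :
    pvKey (pvBst m xs) ≤ pvKey m ∧ ∀ q ∈ xs, pvKey (pvBst m xs) ≤ pvKey q := by
  induction xs generalizing m with
  | nil => simp [pvBst_nil]
  | cons x xs ih =>
    rw [pvBst_cons]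
    by_cases h : pvKey x < pvKey m
    · rw [if_pos h]
      rcases ih x with ⟨h1, h2⟩
      refine ⟨le_of_lt (lt_of_le_of_lt h1 h), ?_⟩
      intro q hq
      rcases List.mem_cons.1 hq with hq | hq
      · exact hq ▸ h1
      · exact h2 q hq
    · rw [if_neg h]
      rcases ih m with ⟨h1, h2⟩
      refine ⟨h1, ?_⟩
      intro q hq
      rcases List.mem_cons.1 hq with hq | hq
      · exact hq ▸ le_trans h1 (le_of_not_gt h)
      · exact h2 q hq

-- pvBst m xs is the FIRST lex-minimum of m :: xs: everything before it is strictly larger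
theorem pvBst_decomp (xs : List (List (String × List Int))) (m : List (String × List Int)) :
    ∃ pre suf, m :: xs = pre ++ pvBst m xs :: suf ∧ ∀ q ∈ pre, pvKey (pvBst m xs) < pvKey q := by
  induction xs generalizing m with
  | nil => exact ⟨[], [], by simp [pvBst_nil]⟩
  | cons x xs ih =>
    rw [pvBst_cons]
    by_cases h : pvKey x < pvKey m
    · rw [if_pos h]
      rcases ih x with ⟨pre, suf, heq, hpre⟩
      refine ⟨m :: pre, suf, by simp [← heq], ?_⟩
      intro q hq
      rcases List.mem_cons.1 hq with hq | hq
      · exact hq ▸ lt_of_le_of_lt (pvBst_min xs x).1 h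
      · exact hpre q hq
    · rw [if_neg h]
      rcases ih m with ⟨pre, suf, heq, hpre⟩
      cases pre with
      | nil =>
        simp only [List.nil_append] at heq
        injection heq with h1 h2
        exact ⟨[], x :: suf, by rw [← h1, h2]; rfl, by simp⟩
      | cons p pre' =>
        simp only [List.cons_append] at heq
        injection heq with h1 h2
        have hbm : pvKey (pvBst m xs) < pvKey m := h1 ▸ hpre p (by simp)
        refine ⟨m :: x :: pre', suf, by simp only [List.cons_append]; rw [← h2], ?_⟩
        intro q hq
        rcases List.mem_cons.1 hq with hq | hq
        · exact hq ▸ hbm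
        rcases List.mem_cons.1 hq with hq' | hq'
        · exact hq' ▸ lt_of_lt_of_le hbm (le_of_not_gt h)
        · exact hpre q (by simp [hq'])

-- shared reference form: the first element whose key is ≤ every key in the list
def pvIsMin (sched : List (List (String × List Int))) (p : List (String × List Int)) : Bool :=
  decide (∀ q ∈ sched, pvKey p ≤ pvKey q)

theorem find?_congr_mem {α : Type} (p q : α → Bool) (xs : List α)
    (h : ∀ x ∈ xs, p x = q x) : xs.find? p = xs.find? q := by
  induction xs with
  | nil => rfl
  | cons x xs ih =>
    simp only [List.find?_cons, h x (by simp)]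
    cases q x <;> simp [ih (fun y hy => h y (by simp [hy]))]

theorem alt_eq_find (x : List (String × List Int)) (xs : List (List (String × List Int))) :
    first_period_alt (x :: xs) = ((x :: xs).find? (pvIsMin (x :: xs))).getD [] := by
  rw [first_period_alt, min2?_eq_bst]
  rcases pvBst_decomp xs x with ⟨pre, suf, heq, hpre⟩
  have hmin := pvBst_min xs x
  have hb : ∀ q ∈ x :: xs, pvKey (pvBst x xs) ≤ pvKey q := by
    intro q hq
    rcases List.mem_cons.1 hq with hq | hq
    · exact hq ▸ hmin.1
    · exact hmin.2 q hq
  have hbmem : pvBst x xs ∈ x :: xs := by rw [heq]; simp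
  rw [show (x :: xs).find? (pvIsMin (x :: xs)) = (pre ++ pvBst x xs :: suf).find? (pvIsMin (x :: xs)) from by rw [← heq],
      List.find?_append]
  have hnone : pre.find? (pvIsMin (x :: xs)) = none := by
    rw [List.find?_eq_none]
    intro q hq
    simp only [pvIsMin, decide_eq_true_eq, not_forall]
    exact ⟨pvBst x xs, hbmem, not_le_of_gt (hpre q hq)⟩
  rw [hnone]
  have hsat : pvIsMin (x :: xs) (pvBst x xs) = true := by
    simp only [pvIsMin, decide_eq_true_eq]
    exact hb
  simp [hsat]

-- A-side: the foldl-append loop is a filter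
theorem A_filter (sched : List (List (String × List Int))) (h : Int) :
    sched.foldl (fun acc period => if pvHr period = h then acc ++ [period] else acc) []
      = sched.filter (fun period => decide (pvHr period = h)) := by
  simpa using PySem.List.foldl_append_if (fun period => decide (pvHr period = h)) (fun p => p) sched []

theorem find?_filter' {α : Type} (xs : List α) (p q : α → Bool) :
    (xs.filter p).find? q = xs.find? (fun x => p x && q x) := by
  induction xs with
  | nil => rfl
  | cons x xs ih =>
    by_cases hp : p x <;> by_cases hq : q x <;>
      simp [hp, hq, ih]

theorem A_eq_find (sched : List (List (String × List Int))) (hpre : Pre_first_period sched) :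
    first_period sched = (sched.find? (pvIsMin sched)).getD [] := by
  rcases hpre with ⟨hne, _⟩
  obtain ⟨mh, hmh⟩ : ∃ mh : Int, PySem.List.min? (sched.map (fun period => pvHr period)) (fun v => v) = some mh :=
    Option.ne_none_iff_exists'.1 (fun hc => hne (by
      simpa [List.map_eq_nil_iff] using (PySem.List.min?_eq_none_iff _ _).1 hc))
  have hmh_mem : mh ∈ sched.map (fun period => pvHr period) := PySem.List.min?_mem hmh
  have hmh_min : ∀ y ∈ sched.map (fun period => pvHr period), mh ≤ y := by
    intro y hy; exact PySem.List.min?_isMin hmh y hy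
  simp only [first_period]
  rw [show (PySem.List.min? (sched.map fun period => pvHr period) (fun v => v)).getD 0 = mh from by
        rw [hmh]; rfl,
      A_filter sched mh]
  set flt := sched.filter (fun period => decide (pvHr period = mh)) with hflt
  have hflt_ne : flt ≠ [] := by
    rcases List.mem_map.1 hmh_mem with ⟨p, hp, hph⟩
    intro hc
    exact (by simpa using (List.filter_eq_nil_iff.1 hc) p hp : pvHr p ≠ mh) hph
  obtain ⟨mm, hmm⟩ : ∃ mm : Int, PySem.List.min? (flt.map (fun period => pvMn period)) (fun v => v) = some mm :=
    Option.ne_none_iff_exists'.1 (fun hc => hflt_ne (by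
      simpa [List.map_eq_nil_iff] using (PySem.List.min?_eq_none_iff _ _).1 hc))
  have hmm_mem : mm ∈ flt.map (fun period => pvMn period) := PySem.List.min?_mem hmm
  have hmm_min : ∀ y ∈ flt.map (fun period => pvMn period), mm ≤ y := by
    intro y hy; exact PySem.List.min?_isMin hmm y hy
  rw [show (PySem.List.min? (flt.map fun period => pvMn period) (fun v => v)).getD 0 = mm from by
        rw [hmm]; rfl,
      hflt, find?_filter']
  congr 1
  apply find?_congr_mem
  intro p hp
  have hiff : (pvHr p = mh ∧ pvMn p = mm) ↔ (∀ q ∈ sched, pvKey p ≤ pvKey q) := by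
    constructor
    · rintro ⟨h1, h2⟩ q hq
      rw [pvKey, pvKey, Prod.Lex.toLex_le_toLex]
      have hle : mh ≤ pvHr q := hmh_min _ (List.mem_map_of_mem hq)
      by_cases hlt : pvHr p < pvHr q
      · exact Or.inl hlt
      · have heq : pvHr q = mh := by omega
        have hqf : q ∈ flt := List.mem_filter.2 ⟨hq, by simp [heq]⟩
        have := hmm_min _ (List.mem_map_of_mem hqf)
        exact Or.inr ⟨by omega, by omega⟩
    · intro hall
      have hple : pvHr p ≤ mh := by
        rcases List.mem_map.1 hmh_mem with ⟨q, hq, hqh⟩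
        have := hall q hq
        rw [pvKey, pvKey, Prod.Lex.toLex_le_toLex] at this
        rcases this with h | ⟨h, _⟩ <;> omega
      have hpge : mh ≤ pvHr p := hmh_min _ (List.mem_map_of_mem hp)
      have h1 : pvHr p = mh := le_antisymm hple hpge
      refine ⟨h1, ?_⟩
      have hpf : p ∈ flt := List.mem_filter.2 ⟨hp, by simp [h1]⟩
      have hmge : mm ≤ pvMn p := hmm_min _ (List.mem_map_of_mem hpf)
      have hmle : pvMn p ≤ mm := by
        rcases List.mem_map.1 hmm_mem with ⟨q, hqf, hqm⟩
        have hq : q ∈ sched := (List.mem_filter.1 hqf).1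
        have hqh : pvHr q = mh := by simpa using (List.mem_filter.1 hqf).2
        have := hall q hq
        rw [pvKey, pvKey, Prod.Lex.toLex_le_toLex] at this
        rcases this with h | ⟨h, h'⟩ <;> omega
      exact le_antisymm hmle hmge
  calc (decide (pvHr p = mh) && (pvMn p == mm))
      = decide (pvHr p = mh ∧ pvMn p = mm) := by
        by_cases h1 : pvHr p = mh <;> by_cases h2 : pvMn p = mm <;> simp [h1, h2]
    _ = pvIsMin sched p := by simp only [pvIsMin, decide_eq_decide]; exact hiff

-- ===== VERDICT (by name: the statement is the Claim_ definition above) =====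
theorem first_period_spec : Claim_equal_first_period := by
  intro sched _ hpre
  unfold Spec_first_period
  cases sched with
  | nil => exact absurd rfl hpre.1
  | cons x xs => rw [A_eq_find (x :: xs) hpre, alt_eq_find]
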